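-- pv_equiv track=rewrite | github.com/kamilkurach/leetcode | python/2549.py | distinctIntegers
-- ===== SOURCE A (Python) =====
-- def distinctIntegers(n: int) -> int:
--     s = []
--     s.append(n)
--     for e in s:
--         for i in range(1, e):
--             if e%i == 1 and i not in s:
--                 s.append(i)
--     return len(s)
-- ===== SOURCE B (Python) =====
-- def distinctIntegers(n: int) -> int:
--     # Reachable set is {n} together with every integer in 2..n-1, hence the closed form.
--     return max(1, n - 1)
-- ===== Notes on version B (the rewrite author's own statement) =====
-- stated objective: faster
-- what changed: Replaces the quadratic growing-list simulation of the reachable set with the closed form max(1, n-1), since the reachable set is exactly {n} plus the integers 2..n-1.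
import Mathlib
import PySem

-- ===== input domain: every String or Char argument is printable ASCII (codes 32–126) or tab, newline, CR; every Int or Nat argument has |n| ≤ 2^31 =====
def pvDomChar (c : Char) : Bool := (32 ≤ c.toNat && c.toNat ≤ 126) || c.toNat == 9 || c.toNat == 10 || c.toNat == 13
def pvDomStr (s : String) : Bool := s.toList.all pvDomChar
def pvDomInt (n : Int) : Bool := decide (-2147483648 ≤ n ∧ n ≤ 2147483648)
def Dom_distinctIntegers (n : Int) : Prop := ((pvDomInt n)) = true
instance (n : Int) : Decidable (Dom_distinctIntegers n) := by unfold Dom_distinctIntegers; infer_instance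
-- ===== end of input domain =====

-- B replaces A's quadratic growing-list simulation with the closed form max(1, n-1).

-- ===== PORT A =====
-- inner `for i in range(1, e): if e%i == 1 and i not in s: s.append(i)`
def pvInnerA (e : Int) (s : List Int) : List Int :=
  (PySem.List.pyRange 1 e 1).foldl
    (fun acc i => if PySem.Int.mod e i = 1 ∧ i ∉ acc then acc ++ [i] else acc) s

-- outer `for e in s` over the growing list, iterated by index; `fuel` only bounds the
-- number of outer iterations and is proved sufficient below (the list never exceeds
-- (n-2).toNat + 1 elements, see pvInv_length).
def pvLoopA : Nat → Nat → List Int → List Int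
  | 0, _, s => s
  | fuel+1, idx, s =>
    match s[idx]? with
    | none => s
    | some e => pvLoopA fuel (idx+1) (pvInnerA e s)

def distinctIntegers (n : Int) : Int :=
  ((pvLoopA (n.toNat + 2) 0 [n]).length : Int)

-- ===== PORT B =====
def distinctIntegers_alt (n : Int) : Int := max 1 (n - 1)

-- ===== PRECONDITION & SPEC =====
def Spec_distinctIntegers (n : Int) (out : Int) : Prop := out = distinctIntegers_alt n
instance (n : Int) (out : Int) : Decidable (Spec_distinctIntegers n out) := by unfold Spec_distinctIntegers; infer_instance

-- ===== CLAIM (what is proved, stated in full; the proofs are below) =====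
def Claim_equal_distinctIntegers : Prop := ∀ (n : Int), Dom_distinctIntegers n → Spec_distinctIntegers n (distinctIntegers n)

-- ===== LEMMAS AND PROOFS =====

theorem pvFold_prefix (e : Int) (l : List Int) (s : List Int) :
    s <+: l.foldl (fun acc i => if PySem.Int.mod e i = 1 ∧ i ∉ acc then acc ++ [i] else acc) s := by
  induction l generalizing s with
  | nil => exact List.prefix_rfl
  | cons a l ih =>
    simp only [List.foldl_cons]
    refine List.IsPrefix.trans ?_ (ih _)
    split
    · exact ⟨[a], rfl⟩
    · exact List.prefix_rfl

theorem pvInnerA_prefix (e : Int) (s : List Int) : s <+: pvInnerA e s :=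
  pvFold_prefix e _ s

theorem pvMod_one (e : Int) : PySem.Int.mod e 1 = 0 := by
  rw [PySem.Int.mod_eq_emod_of_pos (by omega)]
  exact Int.emod_one e

theorem pvMod_succ (k : Int) (hk : 2 ≤ k) : PySem.Int.mod (k + 1) k = 1 := by
  rw [PySem.Int.mod_eq_emod_of_pos (by omega)]
  have h1 : (k + 1) % k = (1 + k * 1) % k := by ring_nf
  rw [h1, Int.add_mul_emod_self_left]
  exact Int.emod_eq_of_lt (by norm_num) (by omega)

theorem mem_pvInnerA (e i : Int) (s : List Int) (h1 : 1 ≤ i) (h2 : i < e)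
    (hc : PySem.Int.mod e i = 1) : i ∈ pvInnerA e s := by
  have hi : i ∈ PySem.List.pyRange 1 e 1 := by
    rw [PySem.List.mem_pyRange_one]; exact ⟨h1, h2⟩
  unfold pvInnerA
  generalize PySem.List.pyRange 1 e 1 = l at hi ⊢
  induction l generalizing s with
  | nil => cases hi
  | cons a l ih =>
    simp only [List.foldl_cons]
    rcases List.mem_cons.mp hi with rfl | hi'
    · refine (pvFold_prefix e l _).subset ?_
      split
      · simp
      · next h =>
        by_contra hns
        exact h ⟨hc, fun hmem => hns hmem⟩
    · exact ih _ hi'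

theorem mem_pvInnerA_cases (e x : Int) (s : List Int) (hx : x ∈ pvInnerA e s) :
    x ∈ s ∨ (2 ≤ x ∧ x < e) := by
  unfold pvInnerA at hx
  have hml : ∀ a ∈ PySem.List.pyRange 1 e 1, 1 ≤ a ∧ a < e := by
    intro a ha; rw [PySem.List.mem_pyRange_one] at ha; exact ha
  generalize PySem.List.pyRange 1 e 1 = l at hx hml
  induction l generalizing s with
  | nil => exact Or.inl hx
  | cons a l ih =>
    simp only [List.foldl_cons] at hx
    have hml' : ∀ b ∈ l, 1 ≤ b ∧ b < e := fun b hb => hml b (List.mem_cons_of_mem a hb)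
    rcases ih _ hx hml' with h | h
    · revert h; split
      · next hcond =>
        intro h
        rcases List.mem_append.mp h with h | h
        · exact Or.inl h
        · simp only [List.mem_singleton] at h
          subst h
          right
          have ha := hml x (by simp)
          refine ⟨?_, ha.2⟩
          rcases eq_or_lt_of_le ha.1 with h1 | h1
          · exfalso; rw [← h1] at hcond
            rw [pvMod_one] at hcond
            exact absurd hcond.1 (by norm_num)
          · omega
      · exact fun h => Or.inl h
    · exact Or.inr h

theorem pvInnerA_nodup (e : Int) (s : List Int) (h : s.Nodup) : (pvInnerA e s).Nodup := by
  unfold pvInnerA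
  generalize PySem.List.pyRange 1 e 1 = l
  induction l generalizing s with
  | nil => exact h
  | cons a l ih =>
    simp only [List.foldl_cons]
    apply ih
    split
    · next hc =>
      rw [List.nodup_append]
      refine ⟨h, List.nodup_singleton a, ?_⟩
      intro x hx b hb
      have hb' : b = a := by simpa using hb
      subst hb'
      intro hxb
      subst hxb
      exact hc.2 hx
    · exact h

theorem pvLoopA_prefix (fuel : Nat) : ∀ (idx : Nat) (s : List Int), s <+: pvLoopA fuel idx s := by
  induction fuel with
  | zero => intro idx s; exact List.prefix_rfl
  | succ fuel ih =>
    intro idx s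
    cases h : s[idx]? with
    | none => simp only [pvLoopA, h]; exact List.prefix_rfl
    | some e => simp only [pvLoopA, h]; exact (pvInnerA_prefix e s).trans (ih _ _)

def PVInv (n : Int) (s : List Int) : Prop :=
  s.Nodup ∧ ∀ x ∈ s, x = n ∨ (2 ≤ x ∧ x ≤ n - 1)

theorem pvInnerA_inv {n e : Int} {s : List Int} (he : e = n ∨ (2 ≤ e ∧ e ≤ n - 1))
    (h : PVInv n s) : PVInv n (pvInnerA e s) := by
  refine ⟨pvInnerA_nodup e s h.1, ?_⟩
  intro x hx
  rcases mem_pvInnerA_cases e x s hx with hx' | hx'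
  · exact h.2 x hx'
  · right
    rcases he with rfl | he <;> omega

theorem pvLoopA_inv {n : Int} (fuel : Nat) : ∀ (idx : Nat) (s : List Int),
    PVInv n s → PVInv n (pvLoopA fuel idx s) := by
  induction fuel with
  | zero => intro idx s h; exact h
  | succ fuel ih =>
    intro idx s h
    cases hg : s[idx]? with
    | none => simp only [pvLoopA, hg]; exact h
    | some e =>
      simp only [pvLoopA, hg]
      apply ih
      have he : e ∈ s := List.mem_of_getElem? hg
      exact pvInnerA_inv (h.2 e he) h

theorem pvInv_length {n : Int} {s : List Int} (h : PVInv n s) :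
    s.length ≤ (n - 2).toNat + 1 := by
  have hsub : s ⊆ n :: PySem.List.pyRange 2 n 1 := by
    intro x hx
    rcases h.2 x hx with rfl | hx2
    · exact List.mem_cons_self
    · exact List.mem_cons_of_mem _ (by rw [PySem.List.mem_pyRange_one]; omega)
  have hsp := List.subperm_of_subset h.1 hsub
  have hl := hsp.length_le
  simpa [PySem.List.length_pyRange_one] using hl

theorem pvLoopA_closed (fuel : Nat) : ∀ (idx : Nat) (s : List Int),
    (pvLoopA fuel idx s).length < idx + fuel →
    ∀ k, idx ≤ k → ∀ e, (pvLoopA fuel idx s)[k]? = some e →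
    ∀ i, 1 ≤ i → i < e → PySem.Int.mod e i = 1 → i ∈ pvLoopA fuel idx s := by
  induction fuel with
  | zero =>
    intro idx s hlen k hk e he i _ _ _
    exfalso
    simp only [pvLoopA] at hlen he
    have hklt : k < s.length := (List.getElem?_eq_some_iff.mp he).1
    omega
  | succ fuel ih =>
    intro idx s hlen k hk e he i hi1 hi2 hc
    cases hg : s[idx]? with
    | none =>
      simp only [pvLoopA, hg] at hlen he ⊢
      exfalso
      have hklt : k < s.length := (List.getElem?_eq_some_iff.mp he).1
      have hge : s.length ≤ idx := List.getElem?_eq_none_iff.mp hg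
      omega
    | some e0 =>
      simp only [pvLoopA, hg] at hlen he ⊢
      rcases Nat.eq_or_lt_of_le hk with heq | hlt
      · -- k = idx: the element at idx is e0
        subst heq
        have hidxlt : idx < s.length := (List.getElem?_eq_some_iff.mp hg).1
        have hpre : pvInnerA e0 s <+: pvLoopA fuel (idx + 1) (pvInnerA e0 s) :=
          pvLoopA_prefix fuel _ _
        have hpre2 : s <+: pvInnerA e0 s := pvInnerA_prefix e0 s
        obtain ⟨t, ht⟩ := hpre2.trans hpre
        have hidx : (pvLoopA fuel (idx + 1) (pvInnerA e0 s))[idx]? = some e0 := by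
          rw [← ht, List.getElem?_append_left hidxlt]
          exact hg
        have he0 : e = e0 := by
          rw [hidx] at he; exact (Option.some.inj he).symm
        subst he0
        exact hpre.subset (mem_pvInnerA e i s hi1 hi2 hc)
      · exact ih (idx + 1) _ (by omega) k hlt e he i hi1 hi2 hc

-- Main characterisation: A computes max 1 (n-1).
theorem distinctIntegers_eq (n : Int) : distinctIntegers n = max 1 (n - 1) := by
  rcases (by omega : n ≤ 0 ∨ 0 < n) with hn | hn
  · -- n ≤ 0: fuel = 2, the range is empty, the list stays [n]
    have ht : n.toNat = 0 := by omega
    rw [distinctIntegers, ht]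
    rw [show (0 + 2 : Nat) = 2 from rfl]
    have hr : PySem.List.pyRange 1 n 1 = [] := PySem.List.pyRange_one_eq_nil (by omega)
    simp [pvLoopA, pvInnerA, hr]
    omega
  · rcases (by omega : n < 3 ∨ 3 ≤ n) with hn3 | hn3
    · -- n = 1 or n = 2
      interval_cases n <;> decide
    · -- n ≥ 3
      set r := pvLoopA (n.toNat + 2) 0 [n] with hr
      have hInv : PVInv n r := pvLoopA_inv _ _ _ ⟨List.nodup_singleton n, by simp⟩
      have hlen : r.length ≤ (n - 2).toNat + 1 := pvInv_length hInv
      have hfuel : r.length < 0 + (n.toNat + 2) := by omega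
      have hclosed : ∀ e ∈ r, ∀ i, 1 ≤ i → i < e → PySem.Int.mod e i = 1 → i ∈ r := by
        intro e he i hi1 hi2 hc
        obtain ⟨k, hk⟩ := List.mem_iff_getElem?.mp he
        exact pvLoopA_closed _ 0 _ hfuel k (Nat.zero_le k) e hk i hi1 hi2 hc
      have hnmem : n ∈ r := (pvLoopA_prefix _ _ _).subset (by simp)
      -- downward induction: n-1-d ∈ r for 2 ≤ n-1-d
      have compl : ∀ d : Nat, 2 ≤ n - 1 - (d : Int) → (n - 1 - (d : Int)) ∈ r := by
        intro d
        induction d with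
        | zero =>
          intro _
          simp only [Nat.cast_zero, sub_zero]
          have hm := pvMod_succ (n - 1) (by omega)
          have hn1 : n - 1 + 1 = n := by ring
          rw [hn1] at hm
          exact hclosed n hnmem (n - 1) (by omega) (by omega) hm
        | succ d ihd =>
          intro hd
          have hd' : 2 ≤ n - 1 - (d : Int) := by push_cast at hd ⊢; omega
          have hk' := ihd hd'
          have heq : n - 1 - ((d : Int) + 1) + 1 = n - 1 - (d : Int) := by ring
          push_cast
          refine hclosed (n - 1 - (d : Int)) hk' (n - 1 - ((d : Int) + 1))
            (by push_cast at hd; omega) (by omega) ?_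
          rw [← heq]
          refine pvMod_succ _ ?_
          push_cast at hd; omega
      -- lower bound on the length
      have hsub : (n :: PySem.List.pyRange 2 n 1) ⊆ r := by
        intro x hx
        rcases List.mem_cons.mp hx with rfl | hx
        · exact hnmem
        · rw [PySem.List.mem_pyRange_one] at hx
          have hcast : ((n - 1 - x).toNat : Int) = n - 1 - x := by omega
          have := compl (n - 1 - x).toNat (by rw [hcast]; omega)
          rw [hcast] at this
          simpa [show n - 1 - (n - 1 - x) = x from by ring] using this
      have hnd : (n :: PySem.List.pyRange 2 n 1).Nodup := by
        refine List.nodup_cons.mpr ⟨?_, PySem.List.nodup_pyRange_one 2 n⟩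
        intro hmem
        rw [PySem.List.mem_pyRange_one] at hmem
        omega
      have hge := (List.subperm_of_subset hnd hsub).length_le
      simp only [List.length_cons, PySem.List.length_pyRange_one] at hge
      have hlen' : r.length = (n - 2).toNat + 1 := by omega
      rw [distinctIntegers, ← hr, hlen']
      push_cast
      omega

-- ===== VERDICT (by name: the statement is the Claim_ definition above) =====
theorem distinctIntegers_spec : Claim_equal_distinctIntegers := by
  intro n _
  unfold Spec_distinctIntegers distinctIntegers_alt
  exact distinctIntegers_eq n
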